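-- pv_equiv track=rewrite | github.com/Alphabetsoup16/WebScraper5000 | source/app.py | ResultHandler
-- ===== SOURCE A (Python) =====
-- from collections import defaultdict
--
-- def ResultHandler(extractedResult: list) -> list:
--     """Creates completed JSON object from target attributes"""
--     result_groups = defaultdict(list)
--     for result in extractedResult:
--         result_groups[result['Id']].append(result)
--
--     results_combined = []
--     for result_key, result_value in result_groups.items():
--         jsonObj = {}
--         for value in result_value:
--             jsonObj |= value
--         results_combined.append(jsonObj)
--
--     return results_combined
-- ===== SOURCE B (Python) =====
-- def ResultHandler(extractedResult: list) -> list: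
--     """Creates completed JSON object from target attributes"""
--     merged = {}
--     for result in extractedResult:
--         rid = result['Id']
--         if rid in merged:
--             merged[rid] |= result
--         else:
--             merged[rid] = dict(result)
--     return list(merged.values())
-- ===== Notes on version B (the rewrite author's own statement) =====
-- stated objective: simpler
-- what changed: Replaced the two-phase group-into-defaultdict-of-lists-then-merge-each-group with a single pass that maintains one ordered dict from Id to the merged dict (copy on first sight, |= on repeats) and returns its values.
import Mathlib
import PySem

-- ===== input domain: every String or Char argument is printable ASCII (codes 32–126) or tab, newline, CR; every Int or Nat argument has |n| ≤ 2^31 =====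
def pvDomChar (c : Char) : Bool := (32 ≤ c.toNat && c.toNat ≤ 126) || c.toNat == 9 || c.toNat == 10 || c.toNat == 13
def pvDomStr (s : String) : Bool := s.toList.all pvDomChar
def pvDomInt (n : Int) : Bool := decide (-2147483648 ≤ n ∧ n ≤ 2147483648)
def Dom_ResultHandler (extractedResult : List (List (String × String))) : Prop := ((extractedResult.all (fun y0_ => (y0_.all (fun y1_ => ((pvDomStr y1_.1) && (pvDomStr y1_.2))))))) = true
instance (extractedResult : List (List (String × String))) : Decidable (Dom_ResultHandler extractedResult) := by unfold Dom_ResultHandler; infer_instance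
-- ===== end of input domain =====

-- B replaces A's two-phase group-then-merge with a single pass into one ordered dict keyed
-- by Id whose values are the already-merged dicts (objective: simpler). Return values only
-- are compared (neither program mutates its argument).

-- ===== PORT A =====
-- Each inner assoc list represents a Python dict; it is wrapped with PySem.Dict.ofList on use.
-- result['Id'] raises KeyError when absent — excluded by Pre_; the port reads a default "" there.
def ResultHandler (extractedResult : List (List (String × String))) : List (List (String × String)) :=
  -- result_groups = defaultdict(list); for result: result_groups[result['Id']].append(result)
  let result_groups : PySem.Dict String (List (PySem.Dict String String)) :=
    extractedResult.foldl
      (fun g r =>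
        let d := PySem.Dict.ofList r
        g.modify ((d.get? "Id").getD "") [] (fun l => l ++ [d]))
      PySem.Dict.empty
  -- for result_key, result_value in result_groups.items(): jsonObj = {}; for value: jsonObj |= value; append
  result_groups.items.foldl
    (fun acc p =>
      let jsonObj := p.2.foldl (fun j v => j.update v.items) PySem.Dict.empty
      acc ++ [jsonObj.items])
    []

-- ===== PORT B =====
def ResultHandler_alt (extractedResult : List (List (String × String))) : List (List (String × String)) :=
  let merged : PySem.Dict String (PySem.Dict String String) :=
    extractedResult.foldl
      (fun m r =>
        let d := PySem.Dict.ofList r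
        let rid := (d.get? "Id").getD ""
        if m.contains rid then m.insert rid ((m.getD rid PySem.Dict.empty).update d.items)  -- merged[rid] |= result
        else m.insert rid d)                                                               -- merged[rid] = dict(result)
      PySem.Dict.empty
  merged.values.map (fun j => j.items)

-- ===== PRECONDITION & SPEC =====
-- Pre_ excludes inputs on which the Python A raises KeyError: a result dict without the key 'Id'.
def Pre_ResultHandler (extractedResult : List (List (String × String))) : Prop :=
  ∀ r ∈ extractedResult, "Id" ∈ r.map Prod.fst
instance (extractedResult : List (List (String × String))) : Decidable (Pre_ResultHandler extractedResult) := by unfold Pre_ResultHandler; infer_instance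

def pvWitness_ResultHandler : (List (List (String × String))) :=
  [[("Id", "1"), ("a", "b")], [("Id", "1"), ("c", "d")], [("Id", "2"), ("a", "z")]]

def Spec_ResultHandler (extractedResult : List (List (String × String))) (out : List (List (String × String))) : Prop := out = ResultHandler_alt extractedResult
instance (extractedResult : List (List (String × String))) (out : List (List (String × String))) : Decidable (Spec_ResultHandler extractedResult out) := by unfold Spec_ResultHandler; infer_instance

-- ===== CLAIM (what is proved, stated in full; the proofs are below) =====
def Claim_equal_ResultHandler : Prop := ∀ (extractedResult : List (List (String × String))), Dom_ResultHandler extractedResult → Pre_ResultHandler extractedResult → Spec_ResultHandler extractedResult (ResultHandler extractedResult)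

-- ===== LEMMAS AND PROOFS =====

-- the merge of one group, as A's inner loop computes it
def mergeGroup (L : List (PySem.Dict String String)) : PySem.Dict String String :=
  L.foldl (fun j v => j.update v.items) PySem.Dict.empty

-- relation between A's group dict and B's merged dict: same keys in the same order,
-- B's value at a key = the merge of A's group at that key
def GRel (g : PySem.Dict String (List (PySem.Dict String String)))
    (m : PySem.Dict String (PySem.Dict String String)) : Prop :=
  m.items = g.items.map (fun p => (p.1, mergeGroup p.2))

theorem mergeGroup_append (L : List (PySem.Dict String String)) (d : PySem.Dict String String) :
    mergeGroup (L ++ [d]) = (mergeGroup L).update d.items := by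
  simp [mergeGroup, List.foldl_append]

theorem update_items_self (d : PySem.Dict String String) (h : d.keys.Nodup) :
    PySem.Dict.empty.update d.items = d := by
  apply PySem.Dict.ext
  have := PySem.Dict.items_foldl_insert_fresh (l := d.items) (k := Prod.fst) (v := Prod.snd)
    (d := (PySem.Dict.empty : PySem.Dict String String))
    (by intro a _; exact PySem.Dict.contains_empty _) (by simpa [PySem.Dict.keys] using h)
  simpa [PySem.Dict.update] using this

theorem grel_contains (g : PySem.Dict String (List (PySem.Dict String String)))
    (m : PySem.Dict String (PySem.Dict String String)) (h : GRel g m) (k : String) :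
    m.contains k = g.contains k := by
  unfold GRel at h
  simp [PySem.Dict.contains, h, List.any_map, Function.comp_def]

theorem grel_get? (g : PySem.Dict String (List (PySem.Dict String String)))
    (m : PySem.Dict String (PySem.Dict String String)) (h : GRel g m) (k : String) :
    m.get? k = (g.get? k).map mergeGroup := by
  unfold GRel at h
  simp only [PySem.Dict.get?, h, List.find?_map]
  have hp : ((fun (p : String × PySem.Dict String String) => p.1 == k) ∘
      fun (p : String × List (PySem.Dict String String)) => (p.1, mergeGroup p.2))
      = (fun p => p.1 == k) := by funext p; rfl
  rw [hp]
  cases List.find? (fun p => p.1 == k) g.items <;> rfl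

theorem grel_insert (g : PySem.Dict String (List (PySem.Dict String String)))
    (m : PySem.Dict String (PySem.Dict String String)) (h : GRel g m) (k : String)
    (L : List (PySem.Dict String String)) :
    GRel (g.insert k L) (m.insert k (mergeGroup L)) := by
  have hh := h
  unfold GRel at hh ⊢
  simp only [PySem.Dict.insert, grel_contains g m h k]
  by_cases hc : g.contains k = true
  · simp only [hc, if_pos, hh, List.map_map]
    apply List.map_congr_left
    intro p _
    by_cases hk : (p.1 == k) = true <;> simp [hk, Function.comp]
  · simp [hc, hh]

theorem grel_step (g : PySem.Dict String (List (PySem.Dict String String)))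
    (m : PySem.Dict String (PySem.Dict String String)) (h : GRel g m)
    (r : List (String × String)) :
    GRel (g.modify (((PySem.Dict.ofList r).get? "Id").getD "") []
            (fun l => l ++ [PySem.Dict.ofList r]))
         (if m.contains (((PySem.Dict.ofList r).get? "Id").getD "")
          then m.insert (((PySem.Dict.ofList r).get? "Id").getD "")
                 ((m.getD (((PySem.Dict.ofList r).get? "Id").getD "") PySem.Dict.empty).update
                   (PySem.Dict.ofList r).items)
          else m.insert (((PySem.Dict.ofList r).get? "Id").getD "") (PySem.Dict.ofList r)) := by
  set d := PySem.Dict.ofList r with hd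
  set k := ((d.get? "Id").getD "") with hk
  have hget : m.getD k PySem.Dict.empty = mergeGroup (g.getD k []) := by
    simp only [PySem.Dict.getD, grel_get? g m h k]
    cases g.get? k <;> simp [mergeGroup]
  by_cases hc : m.contains k = true
  · rw [if_pos hc]
    have heq : (m.getD k PySem.Dict.empty).update d.items = mergeGroup (g.getD k [] ++ [d]) := by
      rw [mergeGroup_append, hget]
    rw [heq]
    exact grel_insert g m h k _
  · rw [if_neg hc]
    have hgc : g.contains k = false := by
      rw [← grel_contains g m h k]; simpa using hc
    have hg : g.getD k [] = [] := PySem.Dict.getD_of_not_contains g [] hgc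
    have hd2 : mergeGroup [d] = d := by
      show PySem.Dict.empty.update d.items = d
      exact update_items_self d (PySem.Dict.nodup_keys_ofList r)
    have hmain := grel_insert g m h k [d]
    rw [hd2] at hmain
    show GRel (g.insert k (g.getD k [] ++ [d])) (m.insert k d)
    rw [hg]
    simpa using hmain

theorem grel_fold (xs : List (List (String × String)))
    (g : PySem.Dict String (List (PySem.Dict String String)))
    (m : PySem.Dict String (PySem.Dict String String)) (h : GRel g m) :
    GRel (xs.foldl (fun g r =>
          g.modify (((PySem.Dict.ofList r).get? "Id").getD "") []
            (fun l => l ++ [PySem.Dict.ofList r])) g)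
        (xs.foldl (fun m r =>
          if m.contains (((PySem.Dict.ofList r).get? "Id").getD "")
          then m.insert (((PySem.Dict.ofList r).get? "Id").getD "")
                 ((m.getD (((PySem.Dict.ofList r).get? "Id").getD "") PySem.Dict.empty).update
                   (PySem.Dict.ofList r).items)
          else m.insert (((PySem.Dict.ofList r).get? "Id").getD "") (PySem.Dict.ofList r)) m) := by
  induction xs generalizing g m with
  | nil => exact h
  | cons r xs ih => exact ih _ _ (grel_step g m h r)

theorem out_eq (g : PySem.Dict String (List (PySem.Dict String String)))
    (m : PySem.Dict String (PySem.Dict String String)) (h : GRel g m) :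
    g.items.foldl (fun acc p => acc ++ [(mergeGroup p.2).items]) []
      = m.values.map (fun j => j.items) := by
  unfold GRel at h
  rw [PySem.List.foldl_append_singleton_eq_map (fun p => (mergeGroup p.2).items) g.items []]
  simp [PySem.Dict.values, h, List.map_map, Function.comp]

-- ===== VERDICT (by name: the statement is the Claim_ definition above) =====
theorem ResultHandler_spec : Claim_equal_ResultHandler := by
  intro xs _ _
  show ResultHandler xs = ResultHandler_alt xs
  unfold ResultHandler ResultHandler_alt
  exact out_eq _ _ (grel_fold xs PySem.Dict.empty PySem.Dict.empty rfl)
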